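-- pv_equiv track=rewrite | github.com/modelblocks/modelblocks-release | wsjparse/scripts/analyzeComplexity.py | backConstruct
-- ===== SOURCE A (Python) =====
-- def backConstruct(inlist):
--   tmpoutlist = []
--   outlist = []
--   outstring = ''
--   for i in range(len(inlist)-1,-1,-1):
--     outstring = inlist[i]['word'].replace('\"','\'')+outstring
--     outlist.append(outstring)
--   return outlist
-- ===== SOURCE B (Python) =====
-- def backConstruct(inlist):
--   cleaned = [d['word'].replace('"', "'") for d in inlist]
--   return [''.join(cleaned[i:]) for i in range(len(cleaned) - 1, -1, -1)]
-- ===== Notes on version B (the rewrite author's own statement) =====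
-- stated objective: alternative
-- what changed: A builds each suffix by prepending to a running accumulator string in one backward loop; B first cleans all words in one pass and then computes every output entry independently as a fresh join of the suffix cleaned[i:].
import Mathlib
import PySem

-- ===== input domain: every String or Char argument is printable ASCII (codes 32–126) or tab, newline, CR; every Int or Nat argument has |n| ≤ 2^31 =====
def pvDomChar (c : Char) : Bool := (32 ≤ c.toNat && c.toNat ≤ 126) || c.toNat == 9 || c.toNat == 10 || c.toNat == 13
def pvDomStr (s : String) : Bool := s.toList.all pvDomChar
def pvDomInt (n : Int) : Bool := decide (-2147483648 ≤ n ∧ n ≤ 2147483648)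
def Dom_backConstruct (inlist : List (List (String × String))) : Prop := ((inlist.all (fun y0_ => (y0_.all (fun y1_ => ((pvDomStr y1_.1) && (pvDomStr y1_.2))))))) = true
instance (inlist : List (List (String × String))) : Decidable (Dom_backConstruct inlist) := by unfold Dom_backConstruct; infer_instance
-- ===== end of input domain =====

-- B replaces A's running prepended-accumulator loop by a cleaned-words table plus an
-- independent suffix join per output entry (objective: alternative decomposition).

-- ===== PORT A =====
-- inlist[i]['word'].replace('"', "'")  (lookup defaulted to ""; Pre_ guarantees the key exists)
def pvWordA (inlist : List (List (String × String))) (i : Int) : String :=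
  PySem.Str.replace ((PySem.Dict.get? (PySem.Dict.mk (PySem.List.pyGetD inlist i [])) "word").getD "") "\"" "'"

def backConstruct (inlist : List (List (String × String))) : List String :=
  let st := (PySem.List.pyRange ((inlist.length : Int) - 1) (-1) (-1)).foldl
    (fun (s : String × List String) i =>
      let outstring := pvWordA inlist i ++ s.1
      (outstring, s.2 ++ [outstring])) ("", [])
  st.2

-- ===== PORT B =====
def backConstruct_alt (inlist : List (List (String × String))) : List String :=
  let cleaned := inlist.map (fun d => PySem.Str.replace ((PySem.Dict.get? (PySem.Dict.mk d) "word").getD "") "\"" "'")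
  (PySem.List.pyRange ((cleaned.length : Int) - 1) (-1) (-1)).map
    (fun i => PySem.Str.join "" (PySem.List.slice cleaned (some i) none))

-- ===== PRECONDITION & SPEC =====
-- Pre_ excludes inputs where some entry lacks the key 'word': there Python A raises KeyError.
def Pre_backConstruct (inlist : List (List (String × String))) : Prop :=
  ∀ d ∈ inlist, (PySem.Dict.get? (PySem.Dict.mk d) "word").isSome = true
instance (inlist : List (List (String × String))) : Decidable (Pre_backConstruct inlist) := by unfold Pre_backConstruct; infer_instance

def pvWitness_backConstruct : (List (List (String × String))) :=
  [[("word", "a\"b")], [("word", "cd"), ("x", "y")], [("word", "e")]]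

def Spec_backConstruct (inlist : List (List (String × String))) (out : List String) : Prop := out = backConstruct_alt inlist
instance (inlist : List (List (String × String))) (out : List String) : Decidable (Spec_backConstruct inlist out) := by unfold Spec_backConstruct; infer_instance

-- ===== CLAIM (what is proved, stated in full; the proofs are below) =====
def Claim_equal_backConstruct : Prop := ∀ (inlist : List (List (String × String))), Dom_backConstruct inlist → Pre_backConstruct inlist → Spec_backConstruct inlist (backConstruct inlist)

-- ===== LEMMAS AND PROOFS =====

theorem pvJoin_empty_cons (x : String) (xs : List String) :
    PySem.Str.join "" (x :: xs) = x ++ PySem.Str.join "" xs := by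
  have h : ∀ l : List (List Char), List.intercalate ([] : List Char) l = l.flatten := by
    intro l
    induction l with
    | nil => simp [List.intercalate]
    | cons a t ih => cases t <;> simp_all [List.intercalate, List.intersperse]
  simp [PySem.Str.join, PySem.Chars.join, h]

theorem pvWordA_eq (inlist : List (List (String × String))) (k : Nat) (hk : k < inlist.length) :
    pvWordA inlist (k : Int)
      = (inlist.map (fun d => PySem.Str.replace ((PySem.Dict.get? (PySem.Dict.mk d) "word").getD "") "\"" "'"))[k]'(by simpa using hk) := by
  simp [pvWordA, hk]

-- invariant of A's loop: starting from the joined suffix at k, processing indices k-1 … 0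
-- appends exactly the fresh suffix joins B computes, in the same order
theorem pvLoop (inlist : List (List (String × String))) :
    ∀ (k : Nat), k ≤ inlist.length → ∀ (acc : List String),
    ((PySem.List.pyRange ((k : Int) - 1) (-1) (-1)).foldl
      (fun (s : String × List String) i =>
        let outstring := pvWordA inlist i ++ s.1
        (outstring, s.2 ++ [outstring]))
      (PySem.Str.join "" ((inlist.map (fun d => PySem.Str.replace ((PySem.Dict.get? (PySem.Dict.mk d) "word").getD "") "\"" "'")).drop k), acc)).2
    = acc ++ (PySem.List.pyRange ((k : Int) - 1) (-1) (-1)).map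
        (fun i => PySem.Str.join "" ((inlist.map (fun d => PySem.Str.replace ((PySem.Dict.get? (PySem.Dict.mk d) "word").getD "") "\"" "'")).drop i.toNat)) := by
  intro k
  induction k with
  | zero =>
    intro _ acc
    rw [show ((0:Nat):Int) - 1 = -1 by norm_num, PySem.List.pyRange_neg_one_eq_nil (by norm_num)]
    simp
  | succ k ih =>
    intro hk acc
    set cleaned := inlist.map (fun d => PySem.Str.replace ((PySem.Dict.get? (PySem.Dict.mk d) "word").getD "") "\"" "'") with hcl
    have hk' : k < inlist.length := by omega
    have hkc : k < cleaned.length := by simpa [hcl] using hk'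
    rw [show ((k+1:Nat):Int) - 1 = (k:Int) by push_cast; ring,
        PySem.List.pyRange_neg_one_cons (by omega)]
    have hdrop : cleaned.drop k = cleaned[k] :: cleaned.drop (k+1) :=
      (List.drop_eq_getElem_cons hkc)
    have hjoin : pvWordA inlist (k:Int) ++ PySem.Str.join "" (cleaned.drop (k+1))
        = PySem.Str.join "" (cleaned.drop k) := by
      rw [hdrop, pvJoin_empty_cons, pvWordA_eq inlist k hk']
    rw [List.foldl_cons, List.map_cons]
    simp only []
    rw [hjoin]
    rw [ih (by omega) (acc ++ [PySem.Str.join "" (cleaned.drop k)])]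
    simp [Int.toNat_natCast]

-- ===== VERDICT (by name: the statement is the Claim_ definition above) =====
theorem backConstruct_spec : Claim_equal_backConstruct := by
  intro inlist _ _
  unfold Spec_backConstruct backConstruct backConstruct_alt
  set cleaned := inlist.map (fun d => PySem.Str.replace ((PySem.Dict.get? (PySem.Dict.mk d) "word").getD "") "\"" "'") with hcl
  have hlen : cleaned.length = inlist.length := by simp [hcl]
  have h0 : PySem.Str.join "" (cleaned.drop inlist.length) = "" := by
    rw [← hlen]; simp [PySem.Str.join, PySem.Chars.join, List.intercalate]
  have hmain := pvLoop inlist inlist.length le_rfl []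
  rw [h0] at hmain
  simp only [hcl] at *
  rw [hmain]
  simp only [List.nil_append]
  rw [hlen]
  apply List.map_congr_left
  intro i hi
  have hi' : 0 ≤ i := by
    have := (PySem.List.mem_pyRange_neg_one.mp hi).1
    omega
  lift i to ℕ using hi'
  simp [PySem.List.slice_from_natCast]
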